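-- pv_equiv track=rewrite | github.com/Serpensin/HypeRate-Python | Tests/conftest.py | generate_invalid_messages
-- ===== SOURCE A (Python) =====
-- from typing import Any, Dict, List, Optional
--
-- def generate_invalid_messages(count: int) -> List[str]:
--     """Generate invalid messages for error testing."""
--     invalid_messages = [
--         "invalid json",
--         '{"topic": "hr:test"}',  # Missing payload
--         '{"payload": {"hr": 75}}',  # Missing topic
--         '{"topic": "", "payload": {"hr": 75}}',  # Empty topic
--         '{"topic": "hr:", "payload": {"hr": 75}}',  # Empty device ID
--         '{"topic": "unknown:test", "payload": {"data": "value"}}',  # Unknown topic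
--     ]
--
--     # Cycle through invalid patterns
--     messages = []
--     for i in range(count):
--         pattern = invalid_messages[i % len(invalid_messages)]
--         messages.append(pattern)
--
--     return messages
-- ===== SOURCE B (Python) =====
-- from typing import Any, Dict, List, Optional
--
-- def generate_invalid_messages(count: int) -> List[str]:
--     """Generate invalid messages for error testing."""
--     invalid_messages = [
--         "invalid json",
--         '{"topic": "hr:test"}',  # Missing payload
--         '{"payload": {"hr": 75}}',  # Missing topic
--         '{"topic": "", "payload": {"hr": 75}}',  # Empty topic
--         '{"topic": "hr:", "payload": {"hr": 75}}',  # Empty device ID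
--         '{"topic": "unknown:test", "payload": {"data": "value"}}',  # Unknown topic
--     ]
--     # Build the cycled list in one shot: repeat the pattern list enough
--     # times to cover `count`, then truncate to exactly `count` items.
--     repeats = count // len(invalid_messages) + 1
--     return (invalid_messages * repeats)[:count]
-- ===== Notes on version B (the rewrite author's own statement) =====
-- stated objective: idiomatic
-- what changed: Replaces the per-index loop with modulo indexing by a closed-form list repetition (invalid_messages * (count//6 + 1)) truncated with a slice [:count].
import Mathlib
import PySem

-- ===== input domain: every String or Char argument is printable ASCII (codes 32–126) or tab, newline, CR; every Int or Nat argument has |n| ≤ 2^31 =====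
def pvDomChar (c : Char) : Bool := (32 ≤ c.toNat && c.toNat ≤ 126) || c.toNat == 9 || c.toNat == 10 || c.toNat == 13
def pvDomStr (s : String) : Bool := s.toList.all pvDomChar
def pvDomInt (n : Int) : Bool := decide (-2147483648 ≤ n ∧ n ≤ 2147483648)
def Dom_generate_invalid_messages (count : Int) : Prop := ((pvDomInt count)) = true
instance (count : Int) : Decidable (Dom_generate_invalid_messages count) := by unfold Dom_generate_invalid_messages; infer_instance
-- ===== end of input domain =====

-- B builds the cycled output by closed-form list repetition plus a slice instead of A's
-- per-index modulo loop (objective: idiomatic; same content, same order).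

-- ===== PORT A =====
-- the literal pattern list A defines inside the function
def pvMsgsA : List String :=
  [ "invalid json"
  , "{\"topic\": \"hr:test\"}"
  , "{\"payload\": {\"hr\": 75}}"
  , "{\"topic\": \"\", \"payload\": {\"hr\": 75}}"
  , "{\"topic\": \"hr:\", \"payload\": {\"hr\": 75}}"
  , "{\"topic\": \"unknown:test\", \"payload\": {\"data\": \"value\"}}" ]

def generate_invalid_messages (count : Int) : List String :=
  (PySem.List.pyRange 0 count 1).foldl
    (fun messages i =>
      -- invalid_messages[i % len(invalid_messages)]; the index is always in
      -- range (0 ≤ i % 6 < 6), so the IndexError branch is unreachable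
      match PySem.List.pyGet? pvMsgsA (PySem.Int.mod i (pvMsgsA.length : Int)) with
      | some pattern => messages ++ [pattern]
      | none => messages)
    []

-- ===== PORT B =====
-- the same literal pattern list, as B defines it
def pvMsgsB : List String :=
  [ "invalid json"
  , "{\"topic\": \"hr:test\"}"
  , "{\"payload\": {\"hr\": 75}}"
  , "{\"topic\": \"\", \"payload\": {\"hr\": 75}}"
  , "{\"topic\": \"hr:\", \"payload\": {\"hr\": 75}}"
  , "{\"topic\": \"unknown:test\", \"payload\": {\"data\": \"value\"}}" ]

def generate_invalid_messages_alt (count : Int) : List String :=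
  PySem.List.slice
    (PySem.List.pyRepeat pvMsgsB (PySem.Int.floordiv count (pvMsgsB.length : Int) + 1))
    none (some count)

-- ===== PRECONDITION & SPEC =====
def Spec_generate_invalid_messages (count : Int) (out : List String) : Prop := out = generate_invalid_messages_alt count
instance (count : Int) (out : List String) : Decidable (Spec_generate_invalid_messages count out) := by unfold Spec_generate_invalid_messages; infer_instance

-- ===== CLAIM (what is proved, stated in full; the proofs are below) =====
def Claim_equal_generate_invalid_messages : Prop := ∀ (count : Int), Dom_generate_invalid_messages count → Spec_generate_invalid_messages count (generate_invalid_messages count)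

-- ===== LEMMAS AND PROOFS =====
theorem pvMsgs_eq : pvMsgsA = pvMsgsB := rfl

theorem pvMsgsA_len : pvMsgsA.length = 6 := rfl

-- the canonical cycled list
def pvCyc (n : Nat) : List String := (List.range n).map (fun k => pvMsgsA.getD (k % 6) "")

theorem pvRepeat_succ (r : Nat) :
    PySem.List.pyRepeat pvMsgsA ((r : Int) + 1) = pvMsgsA ++ PySem.List.pyRepeat pvMsgsA (r : Int) := by
  simp only [PySem.List.pyRepeat]
  have h1 : ((r : Int) + 1).toNat = r + 1 := by omega
  rw [h1, List.replicate_succ, List.flatten_cons]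
  congr 1

theorem pvRepeat_get (r k : Nat) (hk : k < 6 * r) :
    (PySem.List.pyRepeat pvMsgsA (r : Int))[k]? = some (pvMsgsA.getD (k % 6) "") := by
  induction r generalizing k with
  | zero => omega
  | succ r ih =>
      have hc : ((r + 1 : Nat) : Int) = (r : Int) + 1 := by push_cast; ring
      rw [hc, pvRepeat_succ]
      by_cases h6 : k < 6
      · rw [List.getElem?_append_left (by rw [pvMsgsA_len]; omega)]
        have : k % 6 = k := Nat.mod_eq_of_lt h6
        rw [this]
        interval_cases k <;> rfl
      · have hk' : k - 6 < 6 * r := by omega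
        have : k = pvMsgsA.length + (k - 6) := by rw [pvMsgsA_len]; omega
        rw [this, List.getElem?_append_right (by omega)]
        simp only [Nat.add_sub_cancel_left]
        rw [ih _ hk']
        have h3 : (pvMsgsA.length + (k - 6)) % 6 = k % 6 := by rw [pvMsgsA_len]; omega
        rw [h3, show (k - 6) % 6 = k % 6 from by omega]

-- A's fold equals the canonical cycled list
theorem pvA_eq_cyc (n : Nat) : generate_invalid_messages (n : Int) = pvCyc n := by
  induction n with
  | zero => simp [generate_invalid_messages, pvCyc]
  | succ n ih =>
      unfold generate_invalid_messages at *
      have hc : ((n + 1 : Nat) : Int) = (n : Int) + 1 := by push_cast; ring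
      rw [hc, PySem.List.pyRange_one_succ_right (by omega), List.foldl_append, ih]
      have hmod : PySem.Int.mod (n : Int) ((pvMsgsA.length : Nat) : Int) = ((n % 6 : Nat) : Int) := by
        rw [pvMsgsA_len]; exact_mod_cast PySem.Int.mod_natCast n 6
      simp only [List.foldl_cons, List.foldl_nil]
      rw [hmod, PySem.List.pyGet?_natCast]
      have h6 : n % 6 < pvMsgsA.length := by rw [pvMsgsA_len]; omega
      rw [List.getElem?_eq_getElem h6]
      simp only [pvCyc, List.range_succ, List.map_append, List.map_cons, List.map_nil]
      congr 1
      simp [List.getD, List.getElem?_eq_getElem h6]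

-- B equals the canonical cycled list for nonnegative count
theorem pvB_eq_cyc (n : Nat) : generate_invalid_messages_alt (n : Int) = pvCyc n := by
  unfold generate_invalid_messages_alt
  rw [← pvMsgs_eq]
  have hlen : ((pvMsgsA.length : Nat) : Int) = (6 : Int) := by rw [pvMsgsA_len]; rfl
  rw [hlen]
  have hfd : PySem.Int.floordiv (n : Int) 6 + 1 = ((n / 6 + 1 : Nat) : Int) := by
    rw [show (6:Int) = ((6:Nat):Int) from rfl, PySem.Int.floordiv_natCast]
    push_cast; ring
  rw [hfd, PySem.List.slice_to_natCast]
  apply List.ext_getElem?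
  intro k
  by_cases hk : k < n
  · rw [List.getElem?_take_of_lt hk, pvRepeat_get _ _ (by omega)]
    simp [pvCyc, List.getElem?_map, List.getElem?_range hk]
  · have h1 : (List.take n (PySem.List.pyRepeat pvMsgsA ((n / 6 + 1 : Nat) : Int))).length ≤ k := by
      rw [List.length_take]; omega
    have h2 : (pvCyc n).length ≤ k := by simp [pvCyc]; omega
    rw [List.getElem?_eq_none h1, List.getElem?_eq_none h2]

-- both sides are [] for negative count
theorem pvA_neg (count : Int) (h : count < 0) : generate_invalid_messages count = [] := by
  unfold generate_invalid_messages
  have : PySem.List.pyRange 0 count 1 = [] := by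
    simp [PySem.List.pyRange]; omega
  rw [this]; rfl

theorem pvB_neg (count : Int) (h : count < 0) : generate_invalid_messages_alt count = [] := by
  unfold generate_invalid_messages_alt
  rw [← pvMsgs_eq]
  have hlen : ((pvMsgsA.length : Nat) : Int) = (6 : Int) := by rw [pvMsgsA_len]; rfl
  rw [hlen]
  have hfd : PySem.Int.floordiv count 6 + 1 ≤ 0 := by
    have := PySem.Int.floordiv_lt_iff_lt_mul (a := count) (b := 6) (q := 0) (by omega)
    omega
  have hrep : PySem.List.pyRepeat pvMsgsA (PySem.Int.floordiv count 6 + 1) = [] := by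
    have h0 : (PySem.Int.floordiv count 6 + 1).toNat = 0 := by omega
    simp only [PySem.List.pyRepeat, h0, List.replicate_zero, List.flatten_nil]
  rw [hrep]
  simp [PySem.List.slice]

-- ===== VERDICT (by name: the statement is the Claim_ definition above) =====
theorem generate_invalid_messages_spec : Claim_equal_generate_invalid_messages := by
  intro count _
  unfold Spec_generate_invalid_messages
  rcases lt_or_ge count 0 with h | h
  · rw [pvA_neg count h, pvB_neg count h]
  · obtain ⟨n, rfl⟩ : ∃ n : Nat, count = (n : Int) := ⟨count.toNat, (Int.toNat_of_nonneg h).symm⟩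
    rw [pvA_eq_cyc, pvB_eq_cyc]
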